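-- pv_equiv track=rewrite | github.com/devgayaapp/chatboard | __tests__/test_transcript.py | split_text_generator
-- ===== SOURCE A (Python) =====
-- def split_text_generator(text, start_time=0, char_duration = 1):
--     curr_time = start_time
--     for para in [p for p in text.split('\n') if p != '']:
--         words = [w for w in para.split(' ') if w != '']
--         for i, w in enumerate(words):
--             duration = len(w) * char_duration
--             w = w+' ' if i != len(words)-1 else w+'\n'
--             yield w, curr_time, duration
--             curr_time += duration + 1
-- ===== SOURCE B (Python) =====
-- def split_text_generator(text, start_time=0, char_duration=1):
--     # First pass: build a flat (token, duration) list; second pass: one scan assigning times.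
--     entries = []
--     for para in text.split('\n'):
--         words = [w for w in para.split(' ') if w != '']
--         if not words:
--             continue
--         for w in words[:-1]:
--             entries.append((w + ' ', len(w) * char_duration))
--         entries.append((words[-1] + '\n', len(words[-1]) * char_duration))
--     curr_time = start_time
--     for token, duration in entries:
--         yield token, curr_time, duration
--         curr_time += duration + 1
-- ===== Notes on version B (the rewrite author's own statement) =====
-- stated objective: alternative
-- what changed: Replaces the nested paragraph/word traversal with an index check by a build-then-scan: a first pass flattens all paragraphs into one (token, duration) list (suffixing the last word of each paragraph directly, no enumerate/index test), then a single flat loop assigns start times.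
import Mathlib
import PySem

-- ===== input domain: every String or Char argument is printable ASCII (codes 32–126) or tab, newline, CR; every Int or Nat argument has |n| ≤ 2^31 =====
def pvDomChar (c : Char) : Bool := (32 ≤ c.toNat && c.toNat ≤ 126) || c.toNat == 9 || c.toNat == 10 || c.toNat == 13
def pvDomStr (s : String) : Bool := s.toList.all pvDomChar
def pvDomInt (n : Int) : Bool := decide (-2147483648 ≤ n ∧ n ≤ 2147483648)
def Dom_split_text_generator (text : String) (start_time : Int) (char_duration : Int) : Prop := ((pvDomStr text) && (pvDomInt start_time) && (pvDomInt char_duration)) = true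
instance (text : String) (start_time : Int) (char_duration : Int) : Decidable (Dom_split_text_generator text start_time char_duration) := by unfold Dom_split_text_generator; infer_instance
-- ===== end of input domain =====

-- B replaces the nested paragraph/word loop with an index check by a build-then-scan:
-- first flatten to a (token, duration) list, then one flat pass assigns start times (alternative decomposition, same cost).

-- ===== PORT A =====
-- A, literally: for each non-empty paragraph, enumerate its non-empty words, suffix by
-- position (last index gets '\n'), yield (word, curr_time, duration), advance curr_time.
def split_text_generator (text : String) (start_time : Int) (char_duration : Int) : List (String × Int × Int) :=
  (((PySem.Chars.splitOn text.toList ['\n']).filter (· ≠ [])).foldl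
    (fun (s : Int × List (String × Int × Int)) para =>
      let words := (PySem.Chars.splitOn para [' ']).filter (· ≠ [])
      (PySem.List.enumerate words).foldl
        (fun (s : Int × List (String × Int × Int)) iw =>
          let duration : Int := (iw.2.length : Int) * char_duration
          let w := if iw.1 ≠ (words.length : Int) - 1 then iw.2 ++ [' '] else iw.2 ++ ['\n']
          (s.1 + duration + 1, s.2 ++ [(String.ofList w, s.1, duration)]))
        s)
    (start_time, [])).2

-- ===== PORT B =====
-- second pass of B: one flat scan assigning start times
def pvScan : Int → List (List Char × Int) → List (String × Int × Int)
  | _, [] => []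
  | t, (w, d) :: rest => (String.ofList w, t, d) :: pvScan (t + d + 1) rest

-- B, literally: first pass builds the flat (token, duration) list (words[:-1] get ' ',
-- words[-1] gets '\n'); second pass is pvScan.
def split_text_generator_alt (text : String) (start_time : Int) (char_duration : Int) : List (String × Int × Int) :=
  let entries := (PySem.Chars.splitOn text.toList ['\n']).foldl
    (fun (acc : List (List Char × Int)) para =>
      let words := (PySem.Chars.splitOn para [' ']).filter (· ≠ [])
      if words.isEmpty then acc
      else acc ++ words.dropLast.map (fun w => (w ++ [' '], (w.length : Int) * char_duration))
        ++ [(words.getLast! ++ ['\n'], (words.getLast!.length : Int) * char_duration)])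
    []
  pvScan start_time entries

-- ===== PRECONDITION & SPEC =====
def Spec_split_text_generator (text : String) (start_time : Int) (char_duration : Int) (out : List (String × Int × Int)) : Prop := out = split_text_generator_alt text start_time char_duration
instance (text : String) (start_time : Int) (char_duration : Int) (out : List (String × Int × Int)) : Decidable (Spec_split_text_generator text start_time char_duration out) := by unfold Spec_split_text_generator; infer_instance

-- ===== CLAIM (what is proved, stated in full; the proofs are below) =====
def Claim_equal_split_text_generator : Prop := ∀ (text : String) (start_time : Int) (char_duration : Int), Dom_split_text_generator text start_time char_duration → Spec_split_text_generator text start_time char_duration (split_text_generator text start_time char_duration)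

-- ===== LEMMAS AND PROOFS =====

-- the entries B produces for one paragraph with non-empty word list ws
def pvEntW (cd : Int) (ws : List (List Char)) : List (List Char × Int) :=
  ws.dropLast.map (fun w => (w ++ [' '], (w.length : Int) * cd))
    ++ [(ws.getLast! ++ ['\n'], (ws.getLast!.length : Int) * cd)]

-- the entries B produces for one paragraph
def pvEnt (cd : Int) (para : List Char) : List (List Char × Int) :=
  let words := (PySem.Chars.splitOn para [' ']).filter (· ≠ [])
  if words = [] then [] else pvEntW cd words

theorem pvEnt_nil (cd : Int) (para : List Char)
    (h : (PySem.Chars.splitOn para [' ']).filter (· ≠ []) = []) : pvEnt cd para = [] := by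
  simp only [pvEnt]
  rw [if_pos h]

theorem pvEnt_ne_nil (cd : Int) (para : List Char)
    (h : (PySem.Chars.splitOn para [' ']).filter (· ≠ []) ≠ []) :
    pvEnt cd para = pvEntW cd ((PySem.Chars.splitOn para [' ']).filter (· ≠ [])) := by
  simp only [pvEnt]
  rw [if_neg h]

-- total time an entry list consumes
def pvCost (es : List (List Char × Int)) : Int := (es.map (fun e => e.2 + 1)).sum

theorem pvCost_cons (e : List Char × Int) (es : List (List Char × Int)) :
    pvCost (e :: es) = e.2 + 1 + pvCost es := by
  simp [pvCost]
  try ring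

theorem pvCost_append (e1 e2 : List (List Char × Int)) :
    pvCost (e1 ++ e2) = pvCost e1 + pvCost e2 := by
  simp [pvCost]

theorem pvScan_append (t : Int) (e1 e2 : List (List Char × Int)) :
    pvScan t (e1 ++ e2) = pvScan t e1 ++ pvScan (t + pvCost e1) e2 := by
  induction e1 generalizing t with
  | nil => simp [pvScan, pvCost]
  | cons e es ih =>
    obtain ⟨w, d⟩ := e
    rw [List.cons_append]
    simp only [pvScan, List.cons_append]
    rw [ih, show pvCost ((w, d) :: es) = d + 1 + pvCost es from pvCost_cons _ _,
      show t + (d + 1 + pvCost es) = t + d + 1 + pvCost es from by ring]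

theorem pvEntW_cons (cd : Int) (w : List Char) (ws : List (List Char)) (h : ws ≠ []) :
    pvEntW cd (w :: ws) = (w ++ [' '], (w.length : Int) * cd) :: pvEntW cd ws := by
  have hlast : (w :: ws).getLast! = ws.getLast! := by
    rcases List.exists_cons_of_ne_nil h with ⟨a, tl, rfl⟩
    simp [List.getLast!]
  simp only [pvEntW]
  rw [List.dropLast_cons_of_ne_nil h, List.map_cons, hlast, List.cons_append]

-- A's inner word loop over the word list equals B's per-paragraph entries, scanned
theorem pvInner (cd n : Int) (ws : List (List Char)) (hne : ws ≠ [])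
    (k t : Int) (acc : List (String × Int × Int)) (hk : k + ws.length = n) :
    (PySem.List.enumerate ws k).foldl
      (fun (s : Int × List (String × Int × Int)) iw =>
        let duration : Int := (iw.2.length : Int) * cd
        let w := if iw.1 ≠ n - 1 then iw.2 ++ [' '] else iw.2 ++ ['\n']
        (s.1 + duration + 1, s.2 ++ [(String.ofList w, s.1, duration)])) (t, acc)
    = (t + pvCost (pvEntW cd ws), acc ++ pvScan t (pvEntW cd ws)) := by
  induction ws generalizing k t acc with
  | nil => exact absurd rfl hne
  | cons w ws' ih =>
    rcases eq_or_ne ws' [] with h' | h'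
    · subst h'
      simp at hk
      have hkn : k = n - 1 := by omega
      simp [PySem.List.enumerate_cons, PySem.List.enumerate_nil, pvEntW, pvScan,
        pvCost, hkn]
      try ring
    · have hk' : ¬ (k = n - 1) := by
        have : (1 : Int) ≤ ws'.length := by
          have := List.length_pos_iff.mpr h'
          exact_mod_cast this
        simp at hk; omega
      rw [PySem.List.enumerate_cons, List.foldl_cons, pvEntW_cons cd w ws' h']
      simp only [hk', ne_eq, not_false_iff, if_pos]
      rw [ih h' (k + 1) (t + (w.length : Int) * cd + 1)
        (acc ++ [(String.ofList (w ++ [' ']), t, (w.length : Int) * cd)])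
        (by simp at hk ⊢; omega)]
      simp only [pvScan, pvCost_cons, Prod.mk.injEq, List.append_assoc,
        List.singleton_append]
      refine ⟨by ring, ?_⟩
      try rfl
      try trivial

-- B's first pass is the flatMap of pvEnt
theorem pvB_fold (cd : Int) (paras : List (List Char)) (acc : List (List Char × Int)) :
    paras.foldl
      (fun (acc : List (List Char × Int)) para =>
        let words := (PySem.Chars.splitOn para [' ']).filter (· ≠ [])
        if words.isEmpty then acc
        else acc ++ words.dropLast.map (fun w => (w ++ [' '], (w.length : Int) * cd))
          ++ [(words.getLast! ++ ['\n'], (words.getLast!.length : Int) * cd)]) acc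
    = acc ++ paras.flatMap (pvEnt cd) := by
  induction paras generalizing acc with
  | nil => simp
  | cons p ps ih =>
    simp only [List.foldl_cons]
    rcases eq_or_ne ((PySem.Chars.splitOn p [' ']).filter (· ≠ [])) [] with h | h
    · rw [if_pos (by rw [h]; rfl), ih, List.flatMap_cons, pvEnt_nil cd p h,
        List.nil_append]
    · rw [if_neg (by simpa [List.isEmpty_iff] using h), ih, List.flatMap_cons,
        pvEnt_ne_nil cd p h]
      simp only [pvEntW, List.append_assoc]

-- A's paragraph loop equals scanning the flattened entries
theorem pvOuter (cd : Int) (paras : List (List Char)) (t : Int)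
    (acc : List (String × Int × Int)) :
    (paras.filter (· ≠ [])).foldl
      (fun (s : Int × List (String × Int × Int)) para =>
        let words := (PySem.Chars.splitOn para [' ']).filter (· ≠ [])
        (PySem.List.enumerate words).foldl
          (fun (s : Int × List (String × Int × Int)) iw =>
            let duration : Int := (iw.2.length : Int) * cd
            let w := if iw.1 ≠ (words.length : Int) - 1 then iw.2 ++ [' '] else iw.2 ++ ['\n']
            (s.1 + duration + 1, s.2 ++ [(String.ofList w, s.1, duration)]))
          s) (t, acc)
    = (t + pvCost (paras.flatMap (pvEnt cd)), acc ++ pvScan t (paras.flatMap (pvEnt cd))) := by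
  induction paras generalizing t acc with
  | nil => simp [pvScan, pvCost]
  | cons p ps ih =>
    rcases eq_or_ne p [] with hp | hp
    · subst hp
      rw [List.filter_cons_of_neg (by simp), ih, List.flatMap_cons,
        pvEnt_nil cd [] rfl, List.nil_append]
    · rw [List.filter_cons_of_pos (by simpa using hp)]
      simp only [List.foldl_cons]
      rcases eq_or_ne ((PySem.Chars.splitOn p [' ']).filter (· ≠ [])) [] with hw | hw
      · rw [hw]
        simp only [PySem.List.enumerate_nil, List.foldl_nil]
        rw [ih, List.flatMap_cons, pvEnt_nil cd p hw, List.nil_append]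
      · rw [pvInner cd ((((PySem.Chars.splitOn p [' ']).filter (· ≠ [])).length : Int))
          _ hw 0 t acc (by simp)]
        rw [ih, List.flatMap_cons, pvEnt_ne_nil cd p hw]
        simp only [pvCost_append, pvScan_append, Prod.mk.injEq, List.append_assoc]
        refine ⟨by ring, ?_⟩
        try rfl
        try trivial

-- ===== VERDICT (by name: the statement is the Claim_ definition above) =====
theorem split_text_generator_spec : Claim_equal_split_text_generator := by
  intro text st cd _
  unfold Spec_split_text_generator split_text_generator split_text_generator_alt
  rw [pvB_fold, pvOuter]
  simp
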